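-- pv_equiv track=rewrite | github.com/squareyun/study_algorithm | programmers/신고결과받기.py | solution
-- ===== SOURCE A (Python) =====
-- def solution(id_list, report, k):
--     answer = []
--
--     report = list(set(report)) # set을 이용해 중복으로 신고한 내역 제거
--
--     d_accumulate = dict.fromkeys(id_list, 0) # 누적 신고 횟수를 담는 dictionary
--     email = set() # 불량 이용자 이름
--     for r in report:
--         s = r.split()
--         d_accumulate[s[1]] += 1
--         if d_accumulate[s[1]] >= k: # 누적 신고 횟수가 k번 넘으면 불량 이용자로 등록
--             email.add(s[1])
--
--     send = dict.fromkeys(id_list, 0) # 이메일 보낼 횟수를 담는 dictionary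
--     for r in report:
--         s = r.split()
--         if s[1] in email:
--             send[s[0]] += 1
--
--     # return 배열 구성
--     for key, value in send.items():
--         answer.append(value)
--
--     return answer
-- ===== SOURCE B (Python) =====
-- def solution(id_list, report, k):
--     parsed = [r.split() for r in dict.fromkeys(report)]
--     targets = [s[1] for s in parsed]
--     banned = {t for t in targets if targets.count(t) >= k}
--     return [sum(1 for s in parsed if s[0] == uid and s[1] in banned)
--             for uid in dict.fromkeys(id_list)]
-- ===== Notes on version B (the rewrite author's own statement) =====
-- stated objective: simpler
-- what changed: A's two incremental dict/set passes (mutating accumulator dicts keyed by id_list, flagging banned users mid-loop) are replaced by one parse of the deduplicated reports plus a declarative per-user counting comprehension against a banned set computed from counts.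
import Mathlib
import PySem

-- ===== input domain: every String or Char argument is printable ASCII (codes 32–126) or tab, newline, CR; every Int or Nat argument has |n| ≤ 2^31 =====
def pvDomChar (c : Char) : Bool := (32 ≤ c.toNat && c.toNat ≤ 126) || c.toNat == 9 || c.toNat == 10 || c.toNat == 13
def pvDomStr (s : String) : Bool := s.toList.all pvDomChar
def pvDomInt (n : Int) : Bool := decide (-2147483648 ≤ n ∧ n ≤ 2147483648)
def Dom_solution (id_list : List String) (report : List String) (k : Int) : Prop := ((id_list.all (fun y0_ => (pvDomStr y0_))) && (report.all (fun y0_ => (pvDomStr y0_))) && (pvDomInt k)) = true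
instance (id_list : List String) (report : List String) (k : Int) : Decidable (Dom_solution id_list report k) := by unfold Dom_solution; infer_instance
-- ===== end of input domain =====

-- B replaces A's two incremental-dict passes (accumulate counts, then rescan reports against the
-- banned set) by one parse pass plus a per-user counting comprehension over the parsed reports;
-- same return value wherever the Python A returns normally (Pre_ below).

-- r.split()[0] / r.split()[1]; the total form (default "") is only relied on under Pre_, where
-- every report string has at least two whitespace-separated tokens (Python raises IndexError otherwise).
def pvTok0 (r : String) : String := PySem.List.pyGetD (PySem.Str.split₀ r) 0 ""
def pvTok1 (r : String) : String := PySem.List.pyGetD (PySem.Str.split₀ r) 1 ""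

-- ===== PORT A =====
-- The first loop's step over state (d_accumulate, email); Python's d[s[1]] += 1 (KeyError on a
-- missing key, excluded by Pre_) is ported as the total read-add-store insert.
def solution (id_list : List String) (report : List String) (k : Int) : List Int :=
  let rep := PySem.Set.ofList report            -- report = list(set(report)); result is order-independent
  let dInit : PySem.Dict String Int := id_list.foldl (fun d u => d.insert u 0) PySem.Dict.empty
  let st := rep.foldl (fun (st : PySem.Dict String Int × PySem.Set String) r =>
      let t := pvTok1 r
      let d := st.1.insert t (st.1.getD t 0 + 1)
      (d, if d.getD t 0 ≥ k then PySem.Set.add st.2 t else st.2)) (dInit, PySem.Set.empty)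
  let send0 : PySem.Dict String Int := id_list.foldl (fun d u => d.insert u 0) PySem.Dict.empty
  let send := rep.foldl (fun d r =>
      if PySem.Set.contains st.2 (pvTok1 r) then d.insert (pvTok0 r) (d.getD (pvTok0 r) 0 + 1)
      else d) send0
  send.items.foldl (fun a p => a ++ [p.2]) []

-- ===== PORT B =====
def solution_alt (id_list : List String) (report : List String) (k : Int) : List Int :=
  let parsed := (PySem.List.dedup report).map (fun r => (pvTok0 r, pvTok1 r))
  let targets := parsed.map (·.2)
  let banned := PySem.Set.ofList (targets.filter (fun t => (targets.count t : Int) ≥ k))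
  (PySem.List.dedup id_list).map (fun uid =>
      parsed.foldl (fun acc s => if s.1 == uid && PySem.Set.contains banned s.2 then acc + 1 else acc)
        (0 : Int))

-- ===== PRECONDITION & SPEC =====
-- Exactly the inputs on which the Python A returns: every report string splits into at least two
-- tokens with its reported user in id_list (else IndexError/KeyError in the first loop), and when
-- that reported user's distinct-report count reaches k the reporter is in id_list too (else
-- KeyError in the second loop).
def Pre_solution (id_list : List String) (report : List String) (k : Int) : Prop :=
  ∀ r ∈ report,
    2 ≤ (PySem.Str.split₀ r).length ∧
    pvTok1 r ∈ id_list ∧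
    ((((PySem.List.dedup report).map pvTok1).count (pvTok1 r) : Int) ≥ k → pvTok0 r ∈ id_list)
instance (id_list : List String) (report : List String) (k : Int) : Decidable (Pre_solution id_list report k) := by unfold Pre_solution; infer_instance

def pvWitness_solution : List String × List String × Int :=
  (["muzi", "frodo"], ["muzi frodo", "frodo muzi"], 1)

def Spec_solution (id_list : List String) (report : List String) (k : Int) (out : List Int) : Prop := out = solution_alt id_list report k
instance (id_list : List String) (report : List String) (k : Int) (out : List Int) : Decidable (Spec_solution id_list report k out) := by unfold Spec_solution; infer_instance

-- ===== CLAIM (what is proved, stated in full; the proofs are below) =====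
def Claim_equal_solution : Prop := ∀ (id_list : List String) (report : List String) (k : Int), Dom_solution id_list report k → Pre_solution id_list report k → Spec_solution id_list report k (solution id_list report k)
-- ===== LEMMAS AND PROOFS =====

-- the dict built by dict.fromkeys(id_list, 0): every lookup with default 0 gives 0
theorem pv_getD_fromkeys0 (l : List String) (d : PySem.Dict String Int)
    (h : ∀ t, d.getD t 0 = 0) (t : String) :
    (l.foldl (fun d u => d.insert u 0) d).getD t 0 = 0 := by
  induction l generalizing d with
  | nil => exact h t
  | cons u l ih =>
      refine ih _ (fun t => ?_)
      rw [PySem.Dict.getD_insert]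
      split <;> simp [h]

theorem pv_keys_fromkeys0 (l : List String) :
    (l.foldl (fun d u => d.insert u (0 : Int)) PySem.Dict.empty).keys = PySem.Set.ofList l := by
  rw [PySem.Dict.keys_foldl_insert]
  simp [PySem.Dict.keys_empty, PySem.Set.update_nil_left]

-- first loop: the email set holds exactly the targets whose distinct-report count is ≥ k
theorem pv_loop1 (k : Int) (l : List String) : ∀ (p : List String) (d : PySem.Dict String Int) (e : PySem.Set String),
    (∀ t, d.getD t 0 = ((p.map pvTok1).count t : Int)) →
    (∀ t, t ∈ e ↔ (((p.map pvTok1).count t : Int) ≥ k ∧ t ∈ p.map pvTok1)) →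
    ∀ t, t ∈ (l.foldl (fun (st : PySem.Dict String Int × PySem.Set String) r =>
        let t := pvTok1 r
        let d := st.1.insert t (st.1.getD t 0 + 1)
        (d, if d.getD t 0 ≥ k then PySem.Set.add st.2 t else st.2)) (d, e)).2 ↔
      ((((p ++ l).map pvTok1).count t : Int) ≥ k ∧ t ∈ (p ++ l).map pvTok1) := by
  induction l with
  | nil => intro p d e hd he t; simpa using he t
  | cons r l ih =>
      intro p d e hd he t
      have hd' : ∀ t, (d.insert (pvTok1 r) (d.getD (pvTok1 r) 0 + 1)).getD t 0
          = (((p ++ [r]).map pvTok1).count t : Int) := by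
        intro t
        rw [PySem.Dict.getD_insert]
        by_cases h : t = pvTok1 r
        · subst h; simp [hd, List.count_append]
        · simp [h, hd, List.count_append, Ne.symm h]
      have he' : ∀ s, s ∈ (if (d.insert (pvTok1 r) (d.getD (pvTok1 r) 0 + 1)).getD (pvTok1 r) 0 ≥ k
            then PySem.Set.add e (pvTok1 r) else e) ↔
          ((((p ++ [r]).map pvTok1).count s : Int) ≥ k ∧ s ∈ (p ++ [r]).map pvTok1) := by
        intro s
        rw [hd' (pvTok1 r)]
        have hcR : (((p ++ [r]).map pvTok1).count (pvTok1 r) : Int)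
            = ((p.map pvTok1).count (pvTok1 r) : Int) + 1 := by
          push_cast [List.map_append, List.count_append]; simp
        by_cases h : s = pvTok1 r
        · subst h
          by_cases hk : (((p ++ [r]).map pvTok1).count (pvTok1 r) : Int) ≥ k
          · rw [if_pos hk]
            constructor
            · intro _
              exact ⟨hk, by simp [List.map_append]⟩
            · intro _
              rw [PySem.Set.mem_add]
              right; rfl
          · rw [if_neg hk, he]
            constructor
            · rintro ⟨h1, _⟩
              exfalso; exact hk (le_trans h1 (by rw [hcR]; omega))
            · rintro ⟨h1, _⟩; exact absurd h1 hk
        · have hne : pvTok1 r ≠ s := Ne.symm h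
          have hcnt : ((p ++ [r]).map pvTok1).count s = (p.map pvTok1).count s := by
            simp [List.count_append, hne]
          have hmem : s ∈ (p ++ [r]).map pvTok1 ↔ s ∈ p.map pvTok1 := by
            rw [List.map_append, List.mem_append]
            simp only [List.map_cons, List.map_nil, List.mem_singleton]
            constructor
            · rintro (h' | h')
              · exact h'
              · exact absurd h' h
            · exact Or.inl
          split
          · rw [PySem.Set.mem_add, he, hcnt, hmem]
            constructor
            · rintro (h' | h')
              · exact h'
              · exact absurd h' h
            · exact Or.inl
          · rw [he, hcnt, hmem]
      have := ih (p ++ [r]) _ _ hd' he' t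
      simpa [List.append_assoc] using this

-- second loop: keys stay exactly dict.fromkeys(id_list) and each user's cell counts its reports
theorem pv_loop2 (id_list : List String) (e : PySem.Set String) (l : List String) :
    ∀ (d : PySem.Dict String Int),
    d.keys = PySem.Set.ofList id_list →
    (∀ r ∈ l, PySem.Set.contains e (pvTok1 r) = true → pvTok0 r ∈ id_list) →
    (l.foldl (fun d r =>
        if PySem.Set.contains e (pvTok1 r) then d.insert (pvTok0 r) (d.getD (pvTok0 r) 0 + 1)
        else d) d).keys = PySem.Set.ofList id_list ∧
    ∀ t, (l.foldl (fun d r =>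
        if PySem.Set.contains e (pvTok1 r) then d.insert (pvTok0 r) (d.getD (pvTok0 r) 0 + 1)
        else d) d).getD t 0 =
      d.getD t 0 + (l.countP (fun r => PySem.Set.contains e (pvTok1 r) && decide (pvTok0 r = t)) : Int) := by
  induction l with
  | nil => intro d hk _; simp [hk]
  | cons r l ih =>
      intro d hk hmem
      simp only [List.foldl_cons]
      by_cases hc : PySem.Set.contains e (pvTok1 r) = true
      · have h0 : pvTok0 r ∈ id_list := hmem r (by simp) hc
        have hkeys : (d.insert (pvTok0 r) (d.getD (pvTok0 r) 0 + 1)).keys = PySem.Set.ofList id_list := by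
          rw [PySem.Dict.keys_insert_of_contains, hk]
          rw [PySem.Dict.contains_iff_mem_keys, hk, PySem.Set.mem_ofList]
          exact h0
        have hrec := ih (d.insert (pvTok0 r) (d.getD (pvTok0 r) 0 + 1)) hkeys
          (fun r hr h => hmem r (by simp [hr]) h)
        rw [if_pos hc]
        refine ⟨hrec.1, fun t => ?_⟩
        rw [hrec.2 t, PySem.Dict.getD_insert]
        by_cases ht : t = pvTok0 r
        · subst ht
          simp only [List.countP_cons, hc]
          simp only [decide_true, Bool.and_true]
          push_cast [List.countP_cons, hc]
          simp
          omega
        · have : ¬ (pvTok0 r = t) := fun h => ht h.symm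
          simp only [if_neg ht, List.countP_cons, hc]
          simp [this]
      · have hrec := ih d hk (fun r hr h => hmem r (by simp [hr]) h)
        rw [if_neg hc]
        refine ⟨hrec.1, fun t => ?_⟩
        rw [hrec.2 t]
        have hf : PySem.Set.contains e (pvTok1 r) = false := by
          exact Bool.not_eq_true _ ▸ (by simpa using hc)
        have hnotmem : pvTok1 r ∉ e := by
          intro hm
          exact hc (by rw [PySem.Set.contains_iff]; exact hm)
        simp [hnotmem]

-- the whole second pass plus the answer loop: the returned list, one count per distinct user
theorem pv_Aside (id_list : List String) (e : PySem.Set String) (L : List String)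
    (hmem : ∀ r ∈ L, PySem.Set.contains e (pvTok1 r) = true → pvTok0 r ∈ id_list) :
    ((L.foldl (fun d r =>
        if PySem.Set.contains e (pvTok1 r) then d.insert (pvTok0 r) (d.getD (pvTok0 r) 0 + 1)
        else d) (id_list.foldl (fun d u => d.insert u (0 : Int)) PySem.Dict.empty)).items.foldl
      (fun a p => a ++ [p.2]) ([] : List Int)) =
    (PySem.Set.ofList id_list).map (fun uid =>
      (L.countP (fun r => PySem.Set.contains e (pvTok1 r) && decide (pvTok0 r = uid)) : Int)) := by
  obtain ⟨h1, h2⟩ := pv_loop2 id_list e L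
    (id_list.foldl (fun d u => d.insert u 0) PySem.Dict.empty) (pv_keys_fromkeys0 id_list) hmem
  rw [PySem.List.foldl_append_singleton_eq_map, List.nil_append]
  have hv : ∀ (d : PySem.Dict String Int), d.items.map (·.2) = d.values := fun _ => rfl
  rw [hv]
  have hnd : (L.foldl (fun d r =>
      if PySem.Set.contains e (pvTok1 r) then d.insert (pvTok0 r) (d.getD (pvTok0 r) 0 + 1)
      else d) (id_list.foldl (fun d u => d.insert u (0 : Int)) PySem.Dict.empty)).keys.Nodup := by
    rw [h1]; exact PySem.Set.nodup_ofList _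
  rw [PySem.Dict.values_eq_map_keys _ hnd 0, h1]
  refine List.map_congr_left (fun uid _ => ?_)
  rw [h2 uid, pv_getD_fromkeys0 id_list PySem.Dict.empty (fun t => PySem.Dict.getD_empty t 0) uid,
    zero_add]

theorem solution_spec : Claim_equal_solution := by
  intro id_list report k _ hpre
  show solution id_list report k = solution_alt id_list report k
  unfold solution solution_alt
  rw [show PySem.List.dedup report = PySem.Set.ofList report from by simp,
    show PySem.List.dedup id_list = PySem.Set.ofList id_list from by simp]
  set L := PySem.Set.ofList report with hL
  have hmemL : ∀ r ∈ L, r ∈ report := fun r hr => (PySem.Set.mem_ofList report r).1 hr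
  -- characterize the email set built by the first loop
  have hemail := pv_loop1 k L [] (id_list.foldl (fun d u => d.insert u 0) PySem.Dict.empty)
    PySem.Set.empty
    (by
      intro t
      rw [pv_getD_fromkeys0 id_list PySem.Dict.empty (fun t => PySem.Dict.getD_empty t 0) t]
      simp)
    (by intro t; simp [PySem.Set.empty])
  simp only [List.nil_append] at hemail
  set st := L.foldl (fun (st : PySem.Dict String Int × PySem.Set String) r =>
      let t := pvTok1 r
      let d := st.1.insert t (st.1.getD t 0 + 1)
      (d, if d.getD t 0 ≥ k then PySem.Set.add st.2 t else st.2))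
      (id_list.foldl (fun d u => d.insert u 0) PySem.Dict.empty, PySem.Set.empty) with hst
  have hcontains : ∀ t, PySem.Set.contains st.2 t = true ↔
      (((L.map pvTok1).count t : Int) ≥ k ∧ t ∈ L.map pvTok1) := by
    intro t
    rw [PySem.Set.contains_iff, hemail]
  have hmem2 : ∀ r ∈ L, PySem.Set.contains st.2 (pvTok1 r) = true → pvTok0 r ∈ id_list := by
    intro r hr hc
    exact ((hpre r (hmemL r hr)).2.2) ((hcontains (pvTok1 r)).1 hc).1
  rw [pv_Aside id_list st.2 L hmem2]
  -- B's side: each comprehension sum is a countP over the parsed reports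
  refine List.map_congr_left (fun uid _ => ?_)
  rw [PySem.List.foldl_if_add_one, zero_add, List.countP_map]
  congr 1
  refine List.countP_congr (fun r _ => ?_)
  simp only [Function.comp]
  -- both tests decide the same proposition
  have hbanned : (PySem.Set.ofList (((L.map (fun r => (pvTok0 r, pvTok1 r))).map (·.2)).filter
      (fun t => decide ((((L.map (fun r => (pvTok0 r, pvTok1 r))).map (·.2)).count t : Int) ≥ k)))).contains (pvTok1 r)
      = PySem.Set.contains st.2 (pvTok1 r) := by
    have hmemb : pvTok1 r ∈ PySem.Set.ofList (((L.map (fun r => (pvTok0 r, pvTok1 r))).map (·.2)).filter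
        (fun t => decide ((((L.map (fun r => (pvTok0 r, pvTok1 r))).map (·.2)).count t : Int) ≥ k))) ↔
        (((L.map pvTok1).count (pvTok1 r) : Int) ≥ k ∧ pvTok1 r ∈ L.map pvTok1) := by
      rw [PySem.Set.mem_ofList, List.mem_filter]
      simp only [List.map_map, decide_eq_true_eq]
      exact and_comm
    by_cases hq : (((L.map pvTok1).count (pvTok1 r) : Int) ≥ k ∧ pvTok1 r ∈ L.map pvTok1)
    · have hb := (PySem.Set.contains_iff _ _).2 (hmemb.2 hq)
      have hs := (hcontains (pvTok1 r)).2 hq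
      rw [hb, hs]
    · have hb : (PySem.Set.ofList (((L.map (fun r => (pvTok0 r, pvTok1 r))).map (·.2)).filter
          (fun t => decide ((((L.map (fun r => (pvTok0 r, pvTok1 r))).map (·.2)).count t : Int) ≥ k)))).contains (pvTok1 r) = false := by
        rw [Bool.eq_false_iff]
        intro hc
        exact hq (hmemb.1 ((PySem.Set.contains_iff _ _).1 hc))
      have hs : PySem.Set.contains st.2 (pvTok1 r) = false := by
        rw [Bool.eq_false_iff]
        intro hc
        exact hq ((hcontains (pvTok1 r)).1 hc)
      rw [hb, hs]
  constructor
  · intro hand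
    simp only [Bool.and_eq_true] at hand ⊢
    exact ⟨hand.2, by rw [hbanned]; exact hand.1⟩
  · intro hand
    simp only [Bool.and_eq_true] at hand ⊢
    exact ⟨by rw [← hbanned]; exact hand.2, hand.1⟩
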